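-- pv_equiv track=rewrite | github.com/MrBrantCode/unitest_baseline | mut_generate/mist_train_cf/cf_77306/solution.py | advanced_string_transform
-- ===== SOURCE A (Python) =====
-- def advanced_string_transform(a, b):
--     # Create a matrix to store Levenshtein distance between all prefixes of a and b
--     matrix = [[0 for j in range(len(b) + 1)] for i in range(len(a) + 1)]
--
--     # Initialize the matrix
--     for i in range(len(a) + 1):
--         matrix[i][0] = i
--     for j in range(len(b) + 1):
--         matrix[0][j] = j
--
--     # Fill the matrix
--     for i in range(1, len(a) + 1):
--         for j in range(1, len(b) + 1):
--             if a[i - 1] == b[j - 1]: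
--                 cost = 0
--             else:
--                 cost = 1
--             matrix[i][j] = min(matrix[i - 1][j] + 1, matrix[i][j - 1] + 1, matrix[i - 1][j - 1] + cost)
--
--     # Return whether we can transform a into b
--     return matrix[len(a)][len(b)] <= len(a)
-- ===== SOURCE B (Python) =====
-- def advanced_string_transform(a, b):
--     # Answer is known in O(1) outside the band m < n <= 2m; inside it,
--     # compute the distance top-down (memoized recursion from (m, n),
--     # following matches for free) instead of filling a bottom-up table.
--     m, n = len(a), len(b)
--     if n <= m:
--         return True          # distance <= max(m, n) = m
--     if n > 2 * m:
--         return False         # distance >= n - m > m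
--     memo = {}
--
--     def dist(i, j):
--         if (i, j) in memo:
--             return memo[(i, j)]
--         if i == 0:
--             v = j
--         elif j == 0:
--             v = i
--         elif a[i - 1] == b[j - 1]:
--             v = dist(i - 1, j - 1)
--         else:
--             v = 1 + min(dist(i - 1, j), dist(i, j - 1), dist(i - 1, j - 1))
--         memo[(i, j)] = v
--         return v
--
--     return dist(m, n) <= m
-- ===== Notes on version B (the rewrite author's own statement) =====
-- stated objective: faster
-- what changed: B decides in O(1) via edit-distance bounds (len(b)<=len(a) always True, len(b)>2*len(a) always False) and, only inside the band m<n<=2m, computes the distance by top-down memoized recursion from (m,n) that follows matching characters for free, instead of A's bottom-up full (m+1)x(n+1) matrix.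
import Mathlib
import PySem

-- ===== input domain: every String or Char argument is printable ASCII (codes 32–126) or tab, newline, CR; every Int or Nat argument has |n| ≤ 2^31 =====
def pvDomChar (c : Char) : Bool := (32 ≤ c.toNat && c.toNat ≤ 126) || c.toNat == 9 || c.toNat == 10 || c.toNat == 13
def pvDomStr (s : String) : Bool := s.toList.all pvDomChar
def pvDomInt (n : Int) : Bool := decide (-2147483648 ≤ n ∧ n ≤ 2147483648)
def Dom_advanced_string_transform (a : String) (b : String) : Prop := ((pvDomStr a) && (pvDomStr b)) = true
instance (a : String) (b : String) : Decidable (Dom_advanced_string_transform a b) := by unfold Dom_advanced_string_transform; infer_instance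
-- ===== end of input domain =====

-- B replaces A's bottom-up full (m+1)×(n+1) Levenshtein matrix by O(1) bound checks
-- (n ≤ m → true, n > 2m → false) plus, only inside the band m < n ≤ 2m, a top-down
-- memoized recursion from (m,n) that follows matching characters for free.

-- ===== PORT A =====
-- Literal port of A.  Python list mutation `matrix[i][j] = v` is List.set; the
-- `range(...)` loops are folds over List.range / List.range' (all loop indices are
-- nonnegative and in range, so Nat ranges are exact); a[i-1], b[j-1] and all matrix
-- reads are in range on every iteration, so List.getD is exact there.

-- `matrix = [[0 for j ...] for i ...]`
def astMat0 (m n : Nat) : List (List Int) :=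
  (List.range (m+1)).map (fun _ => (List.range (n+1)).map (fun _ => (0:Int)))
-- `for i in range(len(a)+1): matrix[i][0] = i`
def astInitCol (m : Nat) (mat : List (List Int)) : List (List Int) :=
  (List.range (m+1)).foldl (fun mat i => mat.set i ((mat.getD i []).set 0 (i:Int))) mat
-- `for j in range(len(b)+1): matrix[0][j] = j`
def astInitRow (n : Nat) (mat : List (List Int)) : List (List Int) :=
  (List.range (n+1)).foldl (fun mat j => mat.set 0 ((mat.getD 0 []).set j (j:Int))) mat
-- the nested fill loops (cost and the min inlined, same values)
def astFill (as bs : List Char) (mat : List (List Int)) : List (List Int) :=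
  (List.range' 1 as.length).foldl (fun mat i =>
    (List.range' 1 bs.length).foldl (fun mat j =>
      mat.set i ((mat.getD i []).set j
        (min ((mat.getD (i-1) []).getD j 0 + 1)
          (min ((mat.getD i []).getD (j-1) 0 + 1)
               ((mat.getD (i-1) []).getD (j-1) 0
                 + (if as.getD (i-1) ' ' == bs.getD (j-1) ' ' then 0 else 1)))))) mat) mat
def advanced_string_transform (a : String) (b : String) : Bool :=
  let as := a.toList
  let bs := b.toList
  let matrix := astFill as bs (astInitRow bs.length (astInitCol as.length (astMat0 as.length bs.length)))
  decide (((matrix.getD as.length []).getD bs.length 0) ≤ (as.length : Int))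

-- ===== PORT B =====
-- Port of Source B.  The inner `dist(i, j)` with its dict `memo` is bDist, threading the
-- memo through the recursive calls in Python's evaluation order (the `min` call's
-- arguments left to right); `(i, j) in memo` / `memo[(i, j)] = v` are Dict.get?/insert.
def bDist (as bs : List Char) (i j : Nat) (memo : PySem.Dict (Nat × Nat) Int) :
    Int × PySem.Dict (Nat × Nat) Int :=
  match memo.get? (i, j) with
  | some v => (v, memo)
  | none =>
    if hi : i = 0 then ((j : Int), memo.insert (i, j) (j : Int))
    else if hj : j = 0 then ((i : Int), memo.insert (i, j) (i : Int))
    else if as.getD (i-1) ' ' == bs.getD (j-1) ' ' then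
      let r := bDist as bs (i-1) (j-1) memo
      (r.1, r.2.insert (i, j) r.1)
    else
      let r1 := bDist as bs (i-1) j memo
      let r2 := bDist as bs i (j-1) r1.2
      let r3 := bDist as bs (i-1) (j-1) r2.2
      let v := 1 + min r1.1 (min r2.1 r3.1)
      (v, r3.2.insert (i, j) v)
termination_by i + j
decreasing_by all_goals omega

def advanced_string_transform_alt (a : String) (b : String) : Bool :=
  let m := a.toList.length
  let n := b.toList.length
  if n ≤ m then true
  else if 2 * m < n then false
  else decide ((bDist a.toList b.toList m n PySem.Dict.empty).1 ≤ (m : Int))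

-- ===== PRECONDITION & SPEC =====
def Spec_advanced_string_transform (a : String) (b : String) (out : Bool) : Prop := out = advanced_string_transform_alt a b
instance (a : String) (b : String) (out : Bool) : Decidable (Spec_advanced_string_transform a b out) := by unfold Spec_advanced_string_transform; infer_instance

-- ===== CLAIM (what is proved, stated in full; the proofs are below) =====
def Claim_equal_advanced_string_transform : Prop := ∀ (a : String) (b : String), Dom_advanced_string_transform a b → Spec_advanced_string_transform a b (advanced_string_transform a b)

-- ===== LEMMAS AND PROOFS =====

-- the mathematical prefix edit-distance table D(i,j), the common spec of both ports
def dSpec (as bs : List Char) : Nat → Nat → Int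
  | 0, j => (j : Int)
  | i+1, 0 => (i : Int) + 1
  | i+1, j+1 =>
      min (dSpec as bs i (j+1) + 1)
        (min (dSpec as bs (i+1) j + 1)
             (dSpec as bs i j + (if as.getD i ' ' == bs.getD j ' ' then 0 else 1)))

lemma dSpec_zero_right (as bs : List Char) : ∀ i : Nat, dSpec as bs i 0 = (i : Int)
  | 0 => by simp [dSpec]
  | i+1 => by simp [dSpec]

lemma dSpec_bounds (as bs : List Char) : ∀ (i j : Nat),
    ((i:Int) - j ≤ dSpec as bs i j) ∧ ((j:Int) - i ≤ dSpec as bs i j)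
      ∧ dSpec as bs i j ≤ max (i:Int) (j:Int) := by
  intro i
  induction i with
  | zero => intro j; simp only [dSpec]; omega
  | succ i ihI =>
    intro j
    induction j with
    | zero => simp only [dSpec]; omega
    | succ j ihJ =>
      have h1 := ihI (j+1)
      have h2 := ihI j
      simp only [dSpec] at ihJ ⊢
      have hc : (if as.getD i ' ' == bs.getD j ' ' then (0:Int) else 1) = 0 ∨
                (if as.getD i ' ' == bs.getD j ' ' then (0:Int) else 1) = 1 := by
        split <;> simp
      rcases hc with hc | hc <;> rw [hc] <;> push_cast at * <;> omega

lemma dSpec_lip (as bs : List Char) : ∀ s i j, i + j = s →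
    (dSpec as bs i j ≤ dSpec as bs i (j+1) + 1) ∧
    (dSpec as bs i j ≤ dSpec as bs (i+1) j + 1) := by
  intro s
  induction s using Nat.strong_induction_on with
  | _ s ih =>
    intro i j hs
    match i, j with
    | 0, j =>
        constructor
        · simp only [dSpec]; omega
        · have hb := (dSpec_bounds as bs 1 j).2.1
          have e : dSpec as bs 0 j = (j:Int) := by simp [dSpec]
          show dSpec as bs 0 j ≤ dSpec as bs 1 j + 1
          rw [e]; omega
    | i+1, 0 =>
        constructor
        · have := (dSpec_bounds as bs (i+1) 1).1
          rw [dSpec_zero_right]; push_cast at *; omega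
        · rw [dSpec_zero_right, dSpec_zero_right]; omega
    | i+1, j+1 =>
        -- facts from the recurrence at (i+1, j+1)
        have hA1 : dSpec as bs (i+1) (j+1) ≤ dSpec as bs i (j+1) + 1 := by
          simp only [dSpec]; omega
        have hA2 : dSpec as bs (i+1) (j+1) ≤ dSpec as bs (i+1) j + 1 := by
          simp only [dSpec]; omega
        have hI1 := (ih (i+j+1) (by omega) i (j+1) (by omega)).1
        have hI2 := (ih (i+j+1) (by omega) (i+1) j (by omega)).2
        constructor
        · -- dSpec (i+1) (j+1) ≤ dSpec (i+1) (j+2) + 1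
          have e : dSpec as bs (i+1) (j+1+1) =
              min (dSpec as bs i (j+1+1) + 1)
                (min (dSpec as bs (i+1) (j+1) + 1)
                     (dSpec as bs i (j+1) + (if as.getD i ' ' == bs.getD (j+1) ' ' then 0 else 1))) := by
            simp only [dSpec]
          have hc : (if as.getD i ' ' == bs.getD (j+1) ' ' then (0:Int) else 1) = 0 ∨
                    (if as.getD i ' ' == bs.getD (j+1) ' ' then (0:Int) else 1) = 1 := by
            split <;> simp
          rcases hc with hc | hc <;> rw [hc] at e <;> omega
        · -- dSpec (i+1) (j+1) ≤ dSpec (i+2) (j+1) + 1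
          have e : dSpec as bs (i+1+1) (j+1) =
              min (dSpec as bs (i+1) (j+1) + 1)
                (min (dSpec as bs (i+1+1) j + 1)
                     (dSpec as bs (i+1) j + (if as.getD (i+1) ' ' == bs.getD j ' ' then 0 else 1))) := by
            simp only [dSpec]
          have hc : (if as.getD (i+1) ' ' == bs.getD j ' ' then (0:Int) else 1) = 0 ∨
                    (if as.getD (i+1) ' ' == bs.getD j ' ' then (0:Int) else 1) = 1 := by
            split <;> simp
          rcases hc with hc | hc <;> rw [hc] at e <;> omega

-- a matching pair of characters is free: D(i+1, j+1) = D(i, j)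
lemma dSpec_match (as bs : List Char) (i j : Nat)
    (h : (as.getD i ' ' == bs.getD j ' ') = true) :
    dSpec as bs (i+1) (j+1) = dSpec as bs i j := by
  have l1 := (dSpec_lip as bs (i+j) i j rfl).1
  have l2 := (dSpec_lip as bs (i+j) i j rfl).2
  simp only [dSpec, h, if_pos]
  omega

-- ----- B's memoized recursion computes dSpec -----
def MemoOK (as bs : List Char) (memo : PySem.Dict (Nat × Nat) Int) : Prop :=
  ∀ i j v, memo.get? (i, j) = some v → v = dSpec as bs i j

lemma memoOK_insert (as bs : List Char) (memo : PySem.Dict (Nat × Nat) Int)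
    (h : MemoOK as bs memo) (i j : Nat) (v : Int) (hv : v = dSpec as bs i j) :
    MemoOK as bs (memo.insert (i, j) v) := by
  intro i' j' v' h'
  rw [PySem.Dict.get?_insert] at h'
  split at h'
  · rename_i he
    rw [Prod.mk.injEq] at he
    obtain ⟨rfl, rfl⟩ := he
    injection h' with h''
    rw [← h'']
    exact hv
  · exact h i' j' v' h'

lemma bDist_go (as bs : List Char) : ∀ s i j memo, i + j ≤ s → MemoOK as bs memo →
    (bDist as bs i j memo).1 = dSpec as bs i j ∧ MemoOK as bs (bDist as bs i j memo).2 := by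
  intro s
  induction s with
  | zero =>
    intro i j memo hle hm
    have hi : i = 0 := by omega
    have hj : j = 0 := by omega
    subst hi; subst hj
    rw [bDist]
    rcases hget : memo.get? (0, 0) with _ | v
    · simp only [hget]
      refine ⟨by simp [dSpec], memoOK_insert as bs memo hm 0 0 _ (by simp [dSpec])⟩
    · simp only [hget]
      exact ⟨hm 0 0 v hget, hm⟩
  | succ s ihs =>
    intro i j memo hle hm
    rw [bDist]
    rcases hget : memo.get? (i, j) with _ | v
    · simp only [hget]
      by_cases hi : i = 0
      · subst hi
        simp only [dif_pos rfl]
        exact ⟨by simp [dSpec], memoOK_insert as bs memo hm 0 j _ (by simp [dSpec])⟩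
      · simp only [dif_neg hi]
        by_cases hj : j = 0
        · subst hj
          simp only [dif_pos rfl]
          exact ⟨(dSpec_zero_right as bs i).symm,
            memoOK_insert as bs memo hm i 0 _ (dSpec_zero_right as bs i).symm⟩
        · simp only [dif_neg hj]
          obtain ⟨i', rfl⟩ : ∃ i', i = i' + 1 := ⟨i - 1, by omega⟩
          obtain ⟨j', rfl⟩ : ∃ j', j = j' + 1 := ⟨j - 1, by omega⟩
          simp only [Nat.add_sub_cancel]
          by_cases hch : (as.getD i' ' ' == bs.getD j' ' ') = true
          · rw [if_pos hch]
            obtain ⟨hv, hmemo⟩ := ihs i' j' memo (by omega) hm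
            have hval : (bDist as bs i' j' memo).1 = dSpec as bs (i'+1) (j'+1) := by
              rw [hv, dSpec_match as bs i' j' hch]
            exact ⟨hval, memoOK_insert as bs _ hmemo (i'+1) (j'+1) _ hval⟩
          · rw [if_neg hch]
            obtain ⟨hv1, hm1⟩ := ihs i' (j'+1) memo (by omega) hm
            obtain ⟨hv2, hm2⟩ := ihs (i'+1) j' _ (by omega) hm1
            obtain ⟨hv3, hm3⟩ := ihs i' j' _ (by omega) hm2
            have hval : 1 + min (bDist as bs i' (j'+1) memo).1
                (min (bDist as bs (i'+1) j' (bDist as bs i' (j'+1) memo).2).1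
                     (bDist as bs i' j' (bDist as bs (i'+1) j' (bDist as bs i' (j'+1) memo).2).2).1)
                = dSpec as bs (i'+1) (j'+1) := by
              rw [hv1, hv2, hv3]
              have hcost : (if as.getD i' ' ' == bs.getD j' ' ' then (0:Int) else 1) = 1 := by
                rw [if_neg hch]
              simp only [dSpec, hcost]
              omega
            exact ⟨hval, memoOK_insert as bs _ hm3 (i'+1) (j'+1) _ hval⟩
    · simp only [hget]
      exact ⟨hm i j v hget, hm⟩

lemma memoOK_empty (as bs : List Char) : MemoOK as bs PySem.Dict.empty := by
  intro i j v h
  simp [PySem.Dict.get?_empty] at h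

-- ----- A's matrix computes dSpec: machinery relating the fill loops to row recurrences -----

def astGo (ca : Char) (left : Int) : List Int → List Char → List Int
  | p0 :: p1 :: ps, cb :: cbs =>
      let v := min (p1 + 1) (min (left + 1) (p0 + (if ca == cb then 0 else 1)))
      v :: astGo ca v (p1 :: ps) cbs
  | _, _ => []
def astRow (ca : Char) (prev : List Int) (bs : List Char) : List Int :=
  match prev with
  | [] => []
  | p0 :: _ => (p0 + 1) :: astGo ca (p0 + 1) prev bs
def finalRowF (bs : List Char) (as : List Char) : List Int :=
  as.foldl (fun prev ca => astRow ca prev bs) ((List.range (bs.length+1)).map (fun (j : Nat) => (j : Int)))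

def gRow (ca : Char) (prev : List Int) (bs : List Char) : Nat → Int
  | 0 => prev.getD 0 0 + 1
  | j+1 => min (prev.getD (j+1) 0 + 1)
             (min (gRow ca prev bs j + 1)
                  (prev.getD j 0 + (if ca == bs.getD j ' ' then 0 else 1)))

lemma set_getD_self {α} (l : List α) (i : Nat) (d : α) (h : i < l.length) :
    l.set i (l.getD i d) = l := by
  apply List.ext_getElem (by simp)
  intro j h1 h2
  simp only [List.getElem_set]
  split
  · rename_i hij; subst hij; exact (List.getD_eq_getElem l d h).symm ▸ rfl
  · rfl
lemma getD_set_ne {α} (l : List α) (i j : Nat) (x : α) (d : α) (h : i ≠ j) :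
    (l.set i x).getD j d = l.getD j d := by
  simp [List.getD_eq_getElem?_getD, h]
lemma getD_set_self {α} (l : List α) (i : Nat) (x : α) (d : α) (h : i < l.length) :
    (l.set i x).getD i d = x := by
  simp [List.getD_eq_getElem?_getD, h]
lemma foldl_matrix_set (F : List Int → List Int → Nat → List Int) (i : Nat) (hi1 : 1 ≤ i) :
    ∀ (js : List Nat) (mat : List (List Int)) (row : List Int), i < mat.length →
      js.foldl (fun m j => m.set i (F (m.getD (i-1) []) (m.getD i []) j)) (mat.set i row)
      = mat.set i (js.foldl (fun r j => F (mat.getD (i-1) []) r j) row) := by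
  intro js
  induction js with
  | nil => intro mat row _; simp
  | cons j js ih =>
      intro mat row hlen
      simp only [List.foldl_cons]
      have h1 : (mat.set i row).getD (i-1) [] = mat.getD (i-1) [] :=
        getD_set_ne _ _ _ _ _ (by omega)
      have h2 : (mat.set i row).getD i [] = row := getD_set_self _ _ _ _ hlen
      rw [h1, h2, List.set_set]
      exact ih mat _ hlen
lemma foldl_row0_set (F : Nat → List Int → List Int) :
    ∀ (js : List Nat) (mat : List (List Int)) (row : List Int), 0 < mat.length →
      js.foldl (fun m j => m.set 0 (F j (m.getD 0 []))) (mat.set 0 row)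
      = mat.set 0 (js.foldl (fun r j => F j r) row) := by
  intro js
  induction js with
  | nil => intro mat row _; simp
  | cons j js ih =>
      intro mat row hlen
      simp only [List.foldl_cons]
      rw [getD_set_self _ _ _ _ hlen, List.set_set]
      exact ih mat _ hlen
lemma init1_inv (m n : Nat) : ∀ k, k ≤ m+1 →
    (List.range k).foldl (fun mat i => mat.set i ((mat.getD i []).set 0 (i:Int))) (astMat0 m n)
    = (List.range (m+1)).map (fun (i : Nat) =>
        if i < k then ((i:Int) :: List.replicate n 0) else (List.range (n+1)).map (fun _ => (0:Int))) := by
  intro k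
  induction k with
  | zero => intro _; simp [astMat0]
  | succ k ih =>
      intro hk
      rw [List.range_succ, List.foldl_append, ih (by omega), List.foldl_cons, List.foldl_nil]
      have hkm : k < m + 1 := by omega
      have hget : ((List.range (m+1)).map (fun (i : Nat) =>
          if i < k then ((i:Int) :: List.replicate n 0) else (List.range (n+1)).map (fun _ => (0:Int)))).getD k []
          = (List.range (n+1)).map (fun _ => (0:Int)) := by
        rw [List.getD_eq_getElem _ [] (by simpa using hkm)]
        simp
      rw [hget]
      have hrow : ((List.range (n+1)).map (fun _ => (0:Int))).set 0 (k:Int)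
          = ((k:Int) :: List.replicate n 0) := by
        rw [List.map_const']
        simp [List.replicate_succ]
      rw [hrow]
      apply List.ext_getElem (by simp)
      intro j h1 h2
      simp only [List.getElem_set, List.getElem_map, List.getElem_range]
      simp only [List.length_set, List.length_map, List.length_range] at h1
      split
      · rename_i hjk; subst hjk; simp
      · rename_i hjk
        have hiff : (j < k) ↔ (j < k + 1) := by constructor <;> intro <;> omega
        rw [if_congr hiff rfl rfl]
lemma astInitCol_eq (m n : Nat) :
    astInitCol m (astMat0 m n)
    = (List.range (m+1)).map (fun (i : Nat) => ((i:Int) :: List.replicate n 0)) := by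
  rw [astInitCol, init1_inv m n (m+1) le_rfl]
  apply List.map_congr_left
  intro i hi
  simp only [List.mem_range] at hi
  simp [hi]
lemma init2_row (n : Nat) : ∀ k, k ≤ n+1 →
    (List.range k).foldl (fun r j => r.set j (j:Int)) (List.replicate (n+1) (0:Int))
    = (List.range (n+1)).map (fun (j : Nat) => if j < k then (j:Int) else 0) := by
  intro k
  induction k with
  | zero => intro _; simp [List.map_const']
  | succ k ih =>
      intro hk
      rw [List.range_succ, List.foldl_append, ih (by omega), List.foldl_cons, List.foldl_nil]
      apply List.ext_getElem (by simp)
      intro j h1 h2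
      simp only [List.getElem_set, List.getElem_map, List.getElem_range]
      split
      · rename_i hjk; subst hjk; simp
      · rename_i hjk
        have hiff : (j < k) ↔ (j < k + 1) := by constructor <;> intro <;> omega
        rw [if_congr hiff rfl rfl]
lemma astInitRow_eq (m n : Nat) :
    astInitRow n ((List.range (m+1)).map (fun (i : Nat) => ((i:Int) :: List.replicate n 0)))
    = ((List.range (n+1)).map (fun (j : Nat) => (j:Int)))
        :: (List.range' 1 m).map (fun (i : Nat) => ((i:Int) :: List.replicate n 0)) := by
  have hlen : 0 < ((List.range (m+1)).map (fun (i : Nat) => ((i:Int) :: List.replicate n 0))).length := by simp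
  have hfold := foldl_row0_set (fun j r => r.set j (j:Int)) (List.range (n+1))
    ((List.range (m+1)).map (fun (i : Nat) => ((i:Int) :: List.replicate n 0)))
    (((List.range (m+1)).map (fun (i : Nat) => ((i:Int) :: List.replicate n 0))).getD 0 []) hlen
  beta_reduce at hfold
  rw [astInitRow, ← set_getD_self _ 0 [] hlen, hfold]
  have hget : ((List.range (m+1)).map (fun (i : Nat) => ((i:Int) :: List.replicate n 0))).getD 0 []
      = List.replicate (n+1) (0:Int) := by
    rw [List.getD_eq_getElem _ [] (by simp)]
    simp [List.replicate_succ]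
  rw [hget, init2_row n (n+1) le_rfl]
  have hrow : (List.range (n+1)).map (fun (j : Nat) => if j < n+1 then (j:Int) else 0)
      = (List.range (n+1)).map (fun (j : Nat) => (j:Int)) := by
    apply List.map_congr_left; intro j hj
    simp only [List.mem_range] at hj
    simp [hj]
  rw [hrow]
  have houter : (List.range (m+1)).map (fun (i : Nat) => ((i:Int) :: List.replicate n 0))
      = ((0:Int) :: List.replicate n 0) :: (List.range' 1 m).map (fun (i : Nat) => ((i:Int) :: List.replicate n 0)) := by
    rw [List.range_eq_range', List.range'_succ]
    simp
  rw [houter]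
  simp
lemma astGo_eq (ca : Char) (bs : List Char) (prev : List Int) (h : prev.length = bs.length + 1) :
    ∀ c k, k + c = bs.length →
      astGo ca (gRow ca prev bs k) (prev.drop k) (bs.drop k)
      = (List.range' (k+1) c).map (gRow ca prev bs) := by
  intro c
  induction c with
  | zero =>
      intro k hk
      have hk' : k = bs.length := by omega
      subst hk'
      have h2 : prev.drop bs.length = [prev[bs.length]'(by omega)] := by
        rw [List.drop_eq_getElem_cons (by omega)]
        simp [List.drop_of_length_le, h]
      simp [h2, astGo]
  | succ c ih =>
      intro k hk
      have hklt : k < bs.length := by omega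
      have hkp : k < prev.length := by omega
      have hkp1 : k + 1 < prev.length := by omega
      rw [List.drop_eq_getElem_cons hklt, List.drop_eq_getElem_cons hkp,
          List.drop_eq_getElem_cons hkp1]
      simp only [astGo]
      have hv : min (prev[k+1] + 1) (min (gRow ca prev bs k + 1)
            (prev[k] + (if ca == bs[k] then 0 else 1))) = gRow ca prev bs (k+1) := by
        simp [gRow, hkp, hkp1, hklt]
      rw [hv, ← List.drop_eq_getElem_cons hkp1]
      rw [ih (k+1) (by omega)]
      rw [List.range'_succ]
      simp
lemma astRow_eq (ca : Char) (bs : List Char) (prev : List Int) (h : prev.length = bs.length + 1) :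
    astRow ca prev bs = (List.range (bs.length+1)).map (gRow ca prev bs) := by
  obtain ⟨p0, rest, rfl⟩ : ∃ p0 rest, prev = p0 :: rest := by
    cases prev with
    | nil => simp at h
    | cons x xs => exact ⟨x, xs, rfl⟩
  simp only [astRow]
  have h0 := astGo_eq ca bs (p0 :: rest) h bs.length 0 (by omega)
  simp only [List.drop_zero, Nat.zero_add] at h0
  have hg0 : gRow ca (p0 :: rest) bs 0 = p0 + 1 := by simp [gRow]
  rw [hg0] at h0
  rw [List.range_eq_range', List.range'_succ, List.map_cons, h0, hg0]

-- the inner fill loop computes gRow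
lemma fill_row (ca : Char) (bs : List Char) (prev : List Int) (_h : prev.length = bs.length + 1) :
    ∀ l, l ≤ bs.length →
      (List.range' 1 l).foldl
        (fun r j => r.set j (min (prev.getD j 0 + 1)
          (min (r.getD (j-1) 0 + 1)
               (prev.getD (j-1) 0 + (if ca == bs.getD (j-1) ' ' then 0 else 1)))))
        ((List.range (bs.length+1)).map (fun (j : Nat) => if j ≤ 0 then gRow ca prev bs j else 0))
      = (List.range (bs.length+1)).map (fun (j : Nat) => if j ≤ l then gRow ca prev bs j else 0) := by
  intro l
  induction l with
  | zero => intro _; simp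
  | succ l ih =>
      intro hl
      rw [List.range'_concat, List.foldl_append, ih (by omega), List.foldl_cons, List.foldl_nil]
      have e1 : 1 + 1 * l = l + 1 := by omega
      rw [e1]
      have e2 : l + 1 - 1 = l := by omega
      rw [e2]
      have hread : ((List.range (bs.length+1)).map
          (fun (j : Nat) => if j ≤ l then gRow ca prev bs j else 0)).getD l 0
          = gRow ca prev bs l := by
        rw [List.getD_eq_getElem _ 0 (by simp; omega)]
        simp
      rw [hread]
      apply List.ext_getElem (by simp)
      intro j h1 h2
      simp only [List.getElem_set, List.getElem_map, List.getElem_range]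
      simp only [List.length_set, List.length_map, List.length_range] at h1
      split
      · rename_i hjk; subst hjk
        simp [gRow]
      · rename_i hjk
        have hiff : (j ≤ l) ↔ (j ≤ l + 1) := by constructor <;> intro <;> omega
        rw [if_congr hiff rfl rfl]
lemma foldl_astRow_length (bs : List Char) :
    ∀ (as : List Char) (prev : List Int), prev.length = bs.length + 1 →
      ((as.foldl (fun prev ca => astRow ca prev bs) prev).length = bs.length + 1) := by
  intro as
  induction as with
  | nil => intro prev h; simpa using h
  | cons ca as ih =>
      intro prev h
      simp only [List.foldl_cons]
      exact ih _ (by rw [astRow_eq ca bs prev h]; simp)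
lemma foldl_astRow_head (bs : List Char) :
    ∀ (as : List Char) (prev : List Int), prev.length = bs.length + 1 →
      ((as.foldl (fun prev ca => astRow ca prev bs) prev).getD 0 0 = prev.getD 0 0 + as.length) := by
  intro as
  induction as with
  | nil => intro prev h; simp
  | cons ca as ih =>
      intro prev h
      simp only [List.foldl_cons]
      have hlen : (astRow ca prev bs).length = bs.length + 1 := by
        rw [astRow_eq ca bs prev h]; simp
      rw [ih _ hlen]
      have hhead : (astRow ca prev bs).getD 0 0 = prev.getD 0 0 + 1 := by
        rw [astRow_eq ca bs prev h]
        rw [List.getD_eq_getElem _ 0 (by simp)]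
        simp [gRow]
      rw [hhead]
      simp
      omega
lemma finalRowF_length (bs : List Char) (as : List Char) :
    (finalRowF bs as).length = bs.length + 1 :=
  foldl_astRow_length bs as _ (by simp)
lemma finalRowF_head (bs : List Char) (as : List Char) :
    (finalRowF bs as).getD 0 0 = (as.length : Int) := by
  unfold finalRowF
  rw [foldl_astRow_head bs as _ (by simp)]
  rw [List.getD_eq_getElem _ 0 (by simp)]
  simp

-- one outer iteration, given the invariant, writes the next row into the matrix
def astInner (as bs : List Char) (mat : List (List Int)) (i : Nat) : List (List Int) :=
  (List.range' 1 bs.length).foldl (fun mat j =>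
    mat.set i ((mat.getD i []).set j
      (min ((mat.getD (i-1) []).getD j 0 + 1)
        (min ((mat.getD i []).getD (j-1) 0 + 1)
             ((mat.getD (i-1) []).getD (j-1) 0
               + (if as.getD (i-1) ' ' == bs.getD (j-1) ' ' then 0 else 1)))))) mat

lemma astFill_eq_inner (as bs : List Char) (mat : List (List Int)) :
    astFill as bs mat = (List.range' 1 as.length).foldl (astInner as bs) mat := rfl

lemma astInner_eq (as bs : List Char) (mat : List (List Int)) (i : Nat) (hi1 : 1 ≤ i)
    (hlen : i < mat.length) (hi : i ≤ as.length)
    (hprev : mat.getD (i-1) [] = finalRowF bs (as.take (i-1)))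
    (hrow : mat.getD i [] = ((i:Int) :: List.replicate bs.length 0)) :
    astInner as bs mat i = mat.set i (finalRowF bs (as.take i)) := by
  have hfold := foldl_matrix_set
    (fun prev row j => row.set j
      (min (prev.getD j 0 + 1)
        (min (row.getD (j-1) 0 + 1)
             (prev.getD (j-1) 0 + (if as.getD (i-1) ' ' == bs.getD (j-1) ' ' then 0 else 1)))))
    i hi1 (List.range' 1 bs.length) mat (mat.getD i []) hlen
  beta_reduce at hfold
  unfold astInner
  conv_lhs => rw [← set_getD_self mat i [] hlen]
  rw [hfold]
  congr 1
  set ca := as.getD (i-1) ' ' with hca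
  set prev := mat.getD (i-1) [] with hprevdef
  have hplen : prev.length = bs.length + 1 := by
    rw [hprev]; exact finalRowF_length bs _
  have hstart : mat.getD i []
      = (List.range (bs.length+1)).map (fun (j : Nat) => if j ≤ 0 then gRow ca prev bs j else 0) := by
    rw [hrow]
    apply List.ext_getElem (by simp)
    intro j h1 h2
    simp only [List.getElem_map, List.getElem_range]
    cases j with
    | zero =>
        simp only [List.getElem_cons_zero, if_pos (Nat.le_refl 0)]
        have : gRow ca prev bs 0 = prev.getD 0 0 + 1 := rfl
        rw [this, hprev, finalRowF_head]
        have : (as.take (i-1)).length = i - 1 := by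
          simp [List.length_take]; omega
        rw [this]
        omega
    | succ j =>
        simp only [List.getElem_cons_succ]
        simp only [List.length_cons, List.length_replicate] at h1
        rw [List.getElem_replicate]
        have : ¬ (j + 1 ≤ 0) := by omega
        rw [if_neg this]
  rw [hstart, fill_row ca bs prev hplen bs.length le_rfl]
  have hmapg : (List.range (bs.length+1)).map (fun (j : Nat) => if j ≤ bs.length then gRow ca prev bs j else 0)
      = (List.range (bs.length+1)).map (gRow ca prev bs) := by
    apply List.map_congr_left
    intro j hj
    simp only [List.mem_range] at hj
    simp [Nat.le_of_lt_succ hj]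
  rw [hmapg, ← astRow_eq ca bs prev hplen]
  have hi' : i - 1 < as.length := by omega
  have htake : as.take i = as.take (i-1) ++ [as[i-1]'hi'] := by
    conv_lhs => rw [show i = (i-1)+1 from by omega]
    rw [List.take_add_one]
    simp [List.getElem?_eq_getElem hi']
  rw [htake]
  unfold finalRowF
  rw [List.foldl_append]
  simp only [List.foldl_cons, List.foldl_nil]
  rw [hprev]
  unfold finalRowF
  congr 1
  rw [hca]
  exact (List.getD_eq_getElem as ' ' hi')

lemma fill_inv (as bs : List Char) : ∀ k, k ≤ as.length →
    (((List.range' 1 k).foldl (astInner as bs)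
        ((((List.range (bs.length+1)).map (fun (j : Nat) => (j:Int)))
          :: (List.range' 1 as.length).map (fun (i : Nat) => ((i:Int) :: List.replicate bs.length 0))))).length
        = as.length + 1)
    ∧ (((List.range' 1 k).foldl (astInner as bs)
        ((((List.range (bs.length+1)).map (fun (j : Nat) => (j:Int)))
          :: (List.range' 1 as.length).map (fun (i : Nat) => ((i:Int) :: List.replicate bs.length 0))))).getD k []
        = finalRowF bs (as.take k))
    ∧ (∀ i, k < i → i ≤ as.length →
        ((List.range' 1 k).foldl (astInner as bs)
          ((((List.range (bs.length+1)).map (fun (j : Nat) => (j:Int)))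
            :: (List.range' 1 as.length).map (fun (i : Nat) => ((i:Int) :: List.replicate bs.length 0))))).getD i []
        = ((i:Int) :: List.replicate bs.length 0)) := by
  intro k
  induction k with
  | zero =>
      intro _
      refine ⟨by simp, by simp [finalRowF], ?_⟩
      intro i hi0 hile
      simp only [List.range'_zero, List.foldl_nil]
      obtain ⟨j, rfl⟩ : ∃ j, i = j + 1 := ⟨i - 1, by omega⟩
      rw [List.getD_eq_getElem _ [] (by simp; omega)]
      simp only [List.getElem_cons_succ, List.getElem_map, List.getElem_range']
      congr 1
      omega
  | succ k ih =>
      intro hk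
      obtain ⟨hlen, hrowk, htail⟩ := ih (by omega)
      rw [List.range'_concat]
      have e1 : 1 + 1 * k = k + 1 := by omega
      rw [e1, List.foldl_append, List.foldl_cons, List.foldl_nil]
      have hinner := astInner_eq as bs _ (k+1) (by omega) (by omega) (by omega)
        (by simpa using hrowk) (htail (k+1) (by omega) (by omega))
      rw [hinner]
      refine ⟨by simp [hlen], ?_, ?_⟩
      · exact getD_set_self _ _ _ _ (by omega)
      · intro i hi1 hi2
        rw [getD_set_ne _ _ _ _ _ (by omega)]
        exact htail i (by omega) hi2

lemma A_eq_finalRow (a b : String) :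
    advanced_string_transform a b
    = decide ((finalRowF b.toList a.toList).getD b.toList.length 0 ≤ (a.toList.length : Int)) := by
  show decide ((((astFill a.toList b.toList (astInitRow b.toList.length (astInitCol a.toList.length
      (astMat0 a.toList.length b.toList.length)))).getD a.toList.length []).getD b.toList.length 0)
      ≤ (a.toList.length : Int)) = _
  rw [astInitCol_eq, astInitRow_eq, astFill_eq_inner]
  obtain ⟨_, h2, _⟩ := fill_inv a.toList b.toList a.toList.length le_rfl
  rw [h2, List.take_length]

-- each row of A's fill equals the dSpec row
lemma gRow_dSpec (as bs : List Char) (i : Nat) (prev : List Int)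
    (hprev : ∀ j, j ≤ bs.length → prev.getD j 0 = dSpec as bs i j) :
    ∀ j, j ≤ bs.length → gRow (as.getD i ' ') prev bs j = dSpec as bs (i+1) j := by
  intro j
  induction j with
  | zero =>
      intro _
      have : gRow (as.getD i ' ') prev bs 0 = prev.getD 0 0 + 1 := rfl
      rw [this, hprev 0 (by omega), dSpec_zero_right, dSpec_zero_right]
      omega
  | succ j ih =>
      intro hj
      have e : gRow (as.getD i ' ') prev bs (j+1)
          = min (prev.getD (j+1) 0 + 1)
              (min (gRow (as.getD i ' ') prev bs j + 1)
                   (prev.getD j 0 + (if as.getD i ' ' == bs.getD j ' ' then 0 else 1))) := rfl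
      rw [e, hprev (j+1) hj, hprev j (by omega), ih (by omega)]
      simp only [dSpec]

lemma finalRow_dSpec (as bs : List Char) : ∀ i, i ≤ as.length →
    ∀ j, j ≤ bs.length → (finalRowF bs (as.take i)).getD j 0 = dSpec as bs i j := by
  intro i
  induction i with
  | zero =>
      intro _ j hj
      simp only [List.take_zero, finalRowF, List.foldl_nil]
      rw [List.getD_eq_getElem _ 0 (by simp; omega)]
      simp [dSpec]
  | succ i ih =>
      intro hi j hj
      have hi' : i < as.length := by omega
      have htake : as.take (i+1) = as.take i ++ [as[i]'hi'] := by
        rw [List.take_add_one]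
        simp [List.getElem?_eq_getElem hi']
      rw [htake]
      unfold finalRowF
      rw [List.foldl_append]
      simp only [List.foldl_cons, List.foldl_nil]
      have hplen : (finalRowF bs (as.take i)).length = bs.length + 1 := finalRowF_length bs _
      rw [show (as.take i).foldl (fun prev ca => astRow ca prev bs)
            ((List.range (bs.length+1)).map (fun (j : Nat) => (j : Int))) = finalRowF bs (as.take i) from rfl]
      rw [astRow_eq _ bs _ hplen]
      rw [List.getD_eq_getElem _ 0 (by simp; omega)]
      simp only [List.getElem_map, List.getElem_range]
      have hca : as[i]'hi' = as.getD i ' ' := (List.getD_eq_getElem as ' ' hi').symm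
      rw [hca]
      exact gRow_dSpec as bs i _ (fun j hj => ih (by omega) j hj) j hj

lemma A_eq_dSpec (a b : String) :
    advanced_string_transform a b
    = decide (dSpec a.toList b.toList a.toList.length b.toList.length ≤ (a.toList.length : Int)) := by
  rw [A_eq_finalRow]
  have := finalRow_dSpec a.toList b.toList a.toList.length le_rfl b.toList.length le_rfl
  rw [List.take_length] at this
  rw [this]

lemma A_eq_B (a b : String) : advanced_string_transform a b = advanced_string_transform_alt a b := by
  rw [A_eq_dSpec]
  unfold advanced_string_transform_alt
  set as := a.toList
  set bs := b.toList
  set m := as.length with hm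
  set n := bs.length with hn
  obtain ⟨u0, u1, u2⟩ := dSpec_bounds as bs m n
  by_cases h1 : n ≤ m
  · simp only [if_pos h1]
    have hmn : (n:Int) ≤ (m:Int) := by exact_mod_cast h1
    have : dSpec as bs m n ≤ (m:Int) := by omega
    simpa using this
  · simp only [if_neg h1]
    by_cases h2 : 2 * m < n
    · simp only [if_pos h2]
      have hn2 : (2*m : Int) < (n:Int) := by exact_mod_cast h2
      have : ¬ (dSpec as bs m n ≤ (m:Int)) := by push_cast at *; omega
      simpa using this
    · simp only [if_neg h2]
      rw [(bDist_go as bs (m+n) m n PySem.Dict.empty (by omega) (memoOK_empty as bs)).1]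

-- ===== VERDICT (by name: the statement is the Claim_ definition above) =====
theorem advanced_string_transform_spec : Claim_equal_advanced_string_transform := by
  intro a b _
  exact A_eq_B a b
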